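-- pv_equiv track=rewrite | github.com/burakbayramli/books | DS_and_ML_Mathematical_and_Statistical_Methods_Kroese_Taimre/Chapter6/genham.py | nbe
-- ===== SOURCE A (Python) =====
-- def nbe(a,b):
--     numd = len(a)
--     na = a.copy()
--     carry= True
--     for i in reversed(range(numd)):
--         if carry:
--             if na[i] == b-1:
--                 na[i] = 0
--             else:
--                 na[i] = na[i] + 1
--                 carry = False
--     if carry:
--        na.insert(0,1)
--     return(na)
-- ===== SOURCE B (Python) =====
-- def nbe(a, b):
--     # Single FORWARD (left-to-right) streaming pass, no reversal and no
--     # mutation: commit digits that can no longer be touched by the final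
--     # carry, keep the current candidate-to-increment and the run of b-1
--     # digits after it.
--     out = []          # digits strictly before the last non-(b-1) digit
--     last = None       # last non-(b-1) digit seen so far
--     run = 0           # number of (b-1) digits seen after `last`
--     for d in a:
--         if d == b - 1:
--             run += 1
--         else:
--             if last is not None:
--                 out.append(last)
--             out.extend([b - 1] * run)
--             last = d
--             run = 0
--     if last is None:              # every digit was b-1 (or a was empty)
--         return [1] + [0] * len(a)
--     return out + [last + 1] + [0] * run
-- ===== Notes on version B (the rewrite author's own statement) =====
-- stated objective: alternative
-- what changed: Replaces A's right-to-left in-place carry propagation with a single left-to-right streaming fold that commits finalized digits to an output list and tracks only the last non-(b-1) digit and the run of (b-1)s after it, assembling the result at the end without mutating the input.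
import Mathlib
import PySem

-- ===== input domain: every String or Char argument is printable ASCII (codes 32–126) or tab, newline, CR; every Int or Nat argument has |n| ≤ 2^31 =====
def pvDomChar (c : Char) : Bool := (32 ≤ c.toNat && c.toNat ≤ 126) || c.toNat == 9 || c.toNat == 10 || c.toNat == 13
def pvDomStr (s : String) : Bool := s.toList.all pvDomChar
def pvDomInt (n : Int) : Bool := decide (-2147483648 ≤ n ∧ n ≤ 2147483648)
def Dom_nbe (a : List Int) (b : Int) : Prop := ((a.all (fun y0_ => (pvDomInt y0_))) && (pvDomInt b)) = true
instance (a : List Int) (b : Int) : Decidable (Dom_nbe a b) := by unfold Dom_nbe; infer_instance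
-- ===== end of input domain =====

-- B replaces A's right-to-left in-place carry loop by a single left-to-right
-- streaming fold over an (output, last-non-(b-1)-digit, run) accumulator,
-- never mutating the input; objective: alternative decomposition, same O(n).

-- ===== PORT A =====
-- loop body of 'for i in reversed(range(numd))' acting on state (na, carry);
-- every index i satisfies 0 ≤ i < len(na), so Python's na[i] read/write is
-- exactly List.getD / List.set at the Nat index i.
def nbeStep (b : Int) (s : List Int × Bool) (i : Nat) : List Int × Bool :=
  if s.2 then
    if s.1.getD i 0 = b - 1 then (s.1.set i 0, true)
    else (s.1.set i (s.1.getD i 0 + 1), false)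
  else s

def nbe (a : List Int) (b : Int) : List Int :=
  let numd := a.length
  -- na = a.copy(); carry = True; reversed(range(numd))
  let st := ((List.range numd).reverse).foldl (nbeStep b) (a, true)
  if st.2 then 1 :: st.1 else st.1    -- na.insert(0,1)

-- ===== PORT B =====
-- loop body of 'for d in a' acting on state (out, last, run)
def altStep (b : Int) (s : List Int × Option Int × Nat) (d : Int) :
    List Int × Option Int × Nat :=
  if d = b - 1 then (s.1, s.2.1, s.2.2 + 1)
  else ((match s.2.1 with
         | some l => s.1 ++ [l]        -- out.append(last)
         | none => s.1) ++ List.replicate s.2.2 (b - 1),   -- out.extend([b-1]*run)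
        some d, 0)

def nbe_alt (a : List Int) (b : Int) : List Int :=
  let st := a.foldl (altStep b) ([], none, 0)
  match st.2.1 with
  | none => 1 :: List.replicate a.length 0
  | some l => st.1 ++ [l + 1] ++ List.replicate st.2.2 0

-- ===== PRECONDITION & SPEC =====
def Spec_nbe (a : List Int) (b : Int) (out : List Int) : Prop := out = nbe_alt a b
instance (a : List Int) (b : Int) (out : List Int) : Decidable (Spec_nbe a b out) := by unfold Spec_nbe; infer_instance

-- ===== CLAIM (what is proved, stated in full; the proofs are below) =====
def Claim_equal_nbe : Prop := ∀ (a : List Int) (b : Int), Dom_nbe a b → Spec_nbe a b (nbe a b)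

-- ===== LEMMAS AND PROOFS =====

-- trailing run of (b-1) digits, measured on the reversed list
def countBm1 (b : Int) : List Int → Nat
  | [] => 0
  | d :: t => if d = b - 1 then countBm1 b t + 1 else 0

-- common characterisation of the result, used only in the proofs
def nbeSpecFun (a : List Int) (b : Int) : List Int :=
  let n := a.length
  let k := countBm1 b a.reverse
  if k = n then 1 :: List.replicate n 0
  else a.take (n - k - 1) ++ [a.getD (n - k - 1) 0 + 1] ++ List.replicate k 0

-- ---- A-side: the reversed-index fold is the carry computation on a.reverse ----
def incRev (b : Int) : List Int → List Int × Bool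
  | [] => ([], true)
  | d :: t =>
    if d = b - 1 then (0 :: (incRev b t).1, (incRev b t).2)
    else ((d + 1) :: t, false)

theorem foldl_step_false (b : Int) (idxs : List Nat) (l : List Int) :
    idxs.foldl (nbeStep b) (l, false) = (l, false) := by
  induction idxs with
  | nil => rfl
  | cons i t ih => simpa [nbeStep] using ih

theorem nbeStep_length (b : Int) (s : List Int × Bool) (i : Nat) :
    (nbeStep b s i).1.length = s.1.length := by
  unfold nbeStep; split <;> [skip; rfl]; split <;> simp

theorem foldl_step_append (b : Int) (idxs : List Nat) :
    ∀ (as : List Int) (x : Int) (c : Bool), (∀ i ∈ idxs, i < as.length) →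
    idxs.foldl (nbeStep b) (as ++ [x], c) =
      ((idxs.foldl (nbeStep b) (as, c)).1 ++ [x], (idxs.foldl (nbeStep b) (as, c)).2) := by
  induction idxs with
  | nil => intro as x c _; rfl
  | cons i t ih =>
    intro as x c h
    have hi : i < as.length := h i (by simp)
    have hstep : nbeStep b (as ++ [x], c) i =
        ((nbeStep b (as, c) i).1 ++ [x], (nbeStep b (as, c) i).2) := by
      unfold nbeStep
      simp only [List.getD, List.getElem?_append_left hi]
      split <;> [skip; rfl]
      split <;> simp [hi]
    have hlen : (nbeStep b (as, c) i).1.length = as.length := nbeStep_length ..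
    have ht : ∀ j ∈ t, j < (nbeStep b (as, c) i).1.length := by
      intro j hj; rw [hlen]; exact h j (by simp [hj])
    simp only [List.foldl_cons, hstep]
    exact ih _ x _ ht

theorem nbe_loop_eq_incRev (b : Int) (a : List Int) :
    ((List.range a.length).reverse).foldl (nbeStep b) (a, true) =
      ((incRev b a.reverse).1.reverse, (incRev b a.reverse).2) := by
  induction a using List.reverseRecOn with
  | nil => rfl
  | append_singleton as d ih =>
    have hrange : (List.range (as ++ [d]).length).reverse =
        as.length :: (List.range as.length).reverse := by
      simp [List.range_succ]
    have hget : (as ++ [d]).getD as.length 0 = d := by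
      simp [List.getD]
    have hset : ∀ v : Int, (as ++ [d]).set as.length v = as ++ [v] := by
      intro v; simp
    have hmem : ∀ i ∈ (List.range as.length).reverse, i < as.length := by
      intro i hi; simpa using hi
    rw [hrange, List.foldl_cons]
    by_cases hd : d = b - 1
    · have hstep : nbeStep b (as ++ [d], true) as.length = (as ++ [0], true) := by
        simp [nbeStep, hd]
      rw [hstep, foldl_step_append b _ as 0 true hmem, ih]
      simp [incRev, hd]
    · have hstep : nbeStep b (as ++ [d], true) as.length = (as ++ [d + 1], false) := by
        simp [nbeStep, hset, hd]
      rw [hstep, foldl_step_false]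
      simp [incRev, hd]

theorem countBm1_le (b : Int) (r : List Int) : countBm1 b r ≤ r.length := by
  induction r with
  | nil => simp [countBm1]
  | cons d t ih => unfold countBm1; split <;> simp; omega

theorem incRev_all (b : Int) (r : List Int) (h : countBm1 b r = r.length) :
    incRev b r = (List.replicate r.length 0, true) := by
  induction r with
  | nil => rfl
  | cons d t ih =>
    unfold countBm1 at h
    by_cases hd : d = b - 1
    · simp only [if_pos hd] at h
      have := ih (by simpa using h)
      simp [incRev, hd, this, List.replicate_succ]
    · rw [if_neg hd] at h
      exact absurd h.symm (by simp)

theorem incRev_partial (b : Int) (r : List Int) (h : countBm1 b r < r.length) :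
    incRev b r = (List.replicate (countBm1 b r) 0 ++
      (r.getD (countBm1 b r) 0 + 1) :: r.drop (countBm1 b r + 1), false) := by
  induction r with
  | nil => simp at h
  | cons d t ih =>
    by_cases hd : d = b - 1
    · have hk : countBm1 b (d :: t) = countBm1 b t + 1 := by simp [countBm1, hd]
      have ht : countBm1 b t < t.length := by
        rw [hk] at h; simpa using h
      rw [hk]
      simp [incRev, hd, ih ht, List.replicate_succ, List.getD]
    · have hk : countBm1 b (d :: t) = 0 := by simp [countBm1, hd]
      rw [hk]
      simp [incRev, hd, List.getD]

theorem nbe_eq_specFun (a : List Int) (b : Int) : nbe a b = nbeSpecFun a b := by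
  simp only [nbe, nbeSpecFun]
  rw [nbe_loop_eq_incRev]
  have hlen : a.reverse.length = a.length := a.length_reverse
  by_cases hk : countBm1 b a.reverse = a.length
  · rw [incRev_all b a.reverse (by rw [hlen, hk])]
    simp [hk, hlen]
  · have hlt : countBm1 b a.reverse < a.reverse.length := by
      have := countBm1_le b a.reverse
      omega
    rw [incRev_partial b a.reverse hlt]
    set k := countBm1 b a.reverse with hkdef
    simp only [if_neg hk]
    have hdrop : (a.reverse.drop (k + 1)).reverse = a.take (a.length - k - 1) := by
      rw [List.reverse_drop, List.reverse_reverse, hlen]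
      congr 1
    have hget : a.reverse[k]? = a[a.length - k - 1]? := by
      have hk2 : k < a.length := by omega
      have h2 : a.reverse[k]? = a[a.length - 1 - k]? := List.getElem?_reverse hk2
      rwa [show a.length - 1 - k = a.length - k - 1 from by omega] at h2
    simp [hdrop, hget, List.reverse_replicate, List.getD]

-- ---- B-side: the forward fold's state, characterised by the trailing run ----
theorem countBm1_replicate (b : Int) (r : List Int) (h : countBm1 b r = r.length) :
    r = List.replicate r.length (b - 1) := by
  induction r with
  | nil => rfl
  | cons d t ih =>
    unfold countBm1 at h
    by_cases hd : d = b - 1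
    · rw [if_pos hd] at h
      have := ih (by simpa using h)
      simp [List.replicate_succ, hd]
      exact this
    · rw [if_neg hd] at h
      exact absurd h.symm (by simp)

theorem countBm1_take (b : Int) (r : List Int) :
    r.take (countBm1 b r) = List.replicate (countBm1 b r) (b - 1) := by
  induction r with
  | nil => simp [countBm1]
  | cons d t ih =>
    unfold countBm1
    by_cases hd : d = b - 1
    · simp [hd, List.replicate_succ, ih]
    · simp [hd]

theorem drop_eq_rev_take (k : Nat) (as : List Int) (_h : k ≤ as.length) :
    as.drop (as.length - k) = (as.reverse.take k).reverse := by
  rw [List.reverse_take, List.reverse_reverse, as.length_reverse]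

theorem alt_fold_spec (b : Int) (a : List Int) :
    a.foldl (altStep b) ([], none, 0) =
      (if h : countBm1 b a.reverse = a.length then (([] : List Int), none, a.length)
       else (a.take (a.length - countBm1 b a.reverse - 1),
             some (a.getD (a.length - countBm1 b a.reverse - 1) 0),
             countBm1 b a.reverse)) := by
  induction a using List.reverseRecOn with
  | nil => rfl
  | append_singleton as d ih =>
    rw [List.foldl_append, List.foldl_cons, List.foldl_nil, ih]
    have hlen : (as ++ [d]).length = as.length + 1 := by simp
    have hle : countBm1 b as.reverse ≤ as.length := by
      have := countBm1_le b as.reverse; rwa [as.length_reverse] at this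
    by_cases hd : d = b - 1
    · have hk : countBm1 b (as ++ [d]).reverse = countBm1 b as.reverse + 1 := by
        rw [List.reverse_append]; simp [countBm1, hd]
      by_cases hall : countBm1 b as.reverse = as.length
      · rw [dif_pos hall, dif_pos (by rw [hk, hall, hlen])]
        simp [altStep, hd]
      · have hnk : ¬ countBm1 b (as ++ [d]).reverse = (as ++ [d]).length := by
          rw [hk, hlen]; omega
        rw [dif_neg hall, dif_neg hnk]
        simp only [altStep, if_pos hd]
        rw [hk, hlen]
        have e : as.length + 1 - (countBm1 b as.reverse + 1) - 1
            = as.length - countBm1 b as.reverse - 1 := by omega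
        rw [e]
        set k := countBm1 b as.reverse with hkd
        have htk : (as ++ [d]).take (as.length - k - 1) = as.take (as.length - k - 1) :=
          List.take_append_of_le_length (by omega)
        have hgd : (as ++ [d]).getD (as.length - k - 1) 0 = as.getD (as.length - k - 1) 0 := by
          simp [List.getD,
            List.getElem?_append_left (show as.length - k - 1 < as.length by omega)]
        rw [htk, hgd]
    · have hk : countBm1 b (as ++ [d]).reverse = 0 := by
        rw [List.reverse_append]; simp [countBm1, hd]
      have hnk : ¬ countBm1 b (as ++ [d]).reverse = (as ++ [d]).length := by
        rw [hk, hlen]; omega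
      rw [dif_neg hnk]
      have hidx : (as ++ [d]).length - countBm1 b (as ++ [d]).reverse - 1 = as.length := by
        rw [hk, hlen]; omega
      have htk : (as ++ [d]).take as.length = as := by simp
      have hgd : (as ++ [d]).getD as.length 0 = d := by simp [List.getD]
      by_cases hall : countBm1 b as.reverse = as.length
      · rw [dif_pos hall]
        have has : as = List.replicate as.length (b - 1) := by
          have hall' : countBm1 b as.reverse = as.reverse.length := by
            rw [as.length_reverse]; exact hall
          have h1 := countBm1_replicate b as.reverse hall'
          rw [as.length_reverse] at h1
          calc as = as.reverse.reverse := by simp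
            _ = _ := by rw [h1, List.reverse_replicate]
        simp only [altStep, if_neg hd]
        rw [hidx, htk, hgd, hk, List.nil_append]
        exact congrArg (fun l => (l, some d, 0)) has.symm
      · rw [dif_neg hall]
        set k := countBm1 b as.reverse with hkd
        have hklt : k < as.length := by omega
        have hdec : as.take (as.length - k - 1) ++ [as.getD (as.length - k - 1) 0]
            ++ List.replicate k (b - 1) = as := by
          have h1 : as.drop (as.length - k) = List.replicate k (b - 1) := by
            rw [drop_eq_rev_take k as (by omega), hkd, countBm1_take,
              List.reverse_replicate]
          have h3 : as.length - k - 1 < as.length := by omega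
          have h2 : as.drop (as.length - k - 1) =
              as.getD (as.length - k - 1) 0 :: as.drop (as.length - k) := by
            rw [List.getD, List.getElem?_eq_getElem h3, Option.getD_some,
              List.drop_eq_getElem_cons h3]
            have e : as.length - k - 1 + 1 = as.length - k := by omega
            rw [e]
          calc as.take (as.length - k - 1) ++ [as.getD (as.length - k - 1) 0]
                ++ List.replicate k (b - 1)
              = as.take (as.length - k - 1) ++ as.drop (as.length - k - 1) := by
                rw [h2, ← h1]; simp
            _ = as := List.take_append_drop _ _
        simp only [altStep, if_neg hd]
        rw [hidx, htk, hgd, hk]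
        exact congrArg (fun l => (l, some d, 0)) hdec

theorem nbe_alt_eq_specFun (a : List Int) (b : Int) : nbe_alt a b = nbeSpecFun a b := by
  simp only [nbe_alt, nbeSpecFun, alt_fold_spec]
  by_cases hk : countBm1 b a.reverse = a.length
  · rw [dif_pos hk, if_pos hk]
  · rw [dif_neg hk, if_neg hk]

-- ===== VERDICT (by name: the statement is the Claim_ definition above) =====
theorem nbe_spec : Claim_equal_nbe := by
  intro a b _
  show nbe a b = nbe_alt a b
  rw [nbe_eq_specFun, nbe_alt_eq_specFun]
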